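-- pv_equiv track=rewrite | github.com/Mont9165/test_refactoring_analyzer | src/3_smell_analysis/2_calculate_testsmell_change_amount.py | compare_testsmell
-- ===== SOURCE A (Python) =====
-- def get_smell_count(smell_list):
--     testsmell_dict = {}
--     for smell in smell_list:
--         smell_name = smell['smellName']
--         if smell_name in testsmell_dict:
--             testsmell_dict[smell_name] += 1
--         else:
--             testsmell_dict[smell_name] = 1
--     return testsmell_dict
--
-- def compare_testsmell(commit_smell_list, parent_commit_smell_list):
--     testsmell_dict = {'commit_smells': {},
--                       'parent_commit_smells': {},
--                       'diff_smells': {}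
--                       }
--
--     if len(commit_smell_list) != len(parent_commit_smell_list):
--         testsmell_dict['commit_smells'] = get_smell_count(commit_smell_list)
--         testsmell_dict['parent_commit_smells'] = get_smell_count(parent_commit_smell_list)
--     else:
--         testsmell_dict['commit_smells'] = get_smell_count(commit_smell_list)
--         testsmell_dict['parent_commit_smells'] = get_smell_count(parent_commit_smell_list)
--
--     # Calculate the diff
--     all_smells = set(testsmell_dict['commit_smells'].keys()).union(testsmell_dict['parent_commit_smells'].keys())
--     for smell in all_smells:
--         commit_count = testsmell_dict['commit_smells'].get(smell, 0)
--         parent_count = testsmell_dict['parent_commit_smells'].get(smell, 0)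
--         testsmell_dict['diff_smells'][smell] = commit_count - parent_count
--
--     return testsmell_dict
-- ===== SOURCE B (Python) =====
-- def compare_testsmell(commit_smell_list, parent_commit_smell_list):
--     # Two counting passes; the diff dict is accumulated (+1/-1) inside them,
--     # so no set union and no third scan is needed.
--     commit_smells = {}
--     parent_smells = {}
--     diff_smells = {}
--     for smell in commit_smell_list:
--         name = smell['smellName']
--         commit_smells[name] = commit_smells.get(name, 0) + 1
--         diff_smells[name] = diff_smells.get(name, 0) + 1
--     for smell in parent_commit_smell_list:
--         name = smell['smellName']
--         parent_smells[name] = parent_smells.get(name, 0) + 1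
--         diff_smells[name] = diff_smells.get(name, 0) - 1
--     return {'commit_smells': commit_smells,
--             'parent_commit_smells': parent_smells,
--             'diff_smells': diff_smells}
-- ===== Notes on version B (the rewrite author's own statement) =====
-- stated objective: simpler
-- what changed: The diff dict is accumulated with +1/-1 inside the two counting passes themselves (helper inlined), so the set().union() of the key sets and the third scan over it disappear.
import Mathlib
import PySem

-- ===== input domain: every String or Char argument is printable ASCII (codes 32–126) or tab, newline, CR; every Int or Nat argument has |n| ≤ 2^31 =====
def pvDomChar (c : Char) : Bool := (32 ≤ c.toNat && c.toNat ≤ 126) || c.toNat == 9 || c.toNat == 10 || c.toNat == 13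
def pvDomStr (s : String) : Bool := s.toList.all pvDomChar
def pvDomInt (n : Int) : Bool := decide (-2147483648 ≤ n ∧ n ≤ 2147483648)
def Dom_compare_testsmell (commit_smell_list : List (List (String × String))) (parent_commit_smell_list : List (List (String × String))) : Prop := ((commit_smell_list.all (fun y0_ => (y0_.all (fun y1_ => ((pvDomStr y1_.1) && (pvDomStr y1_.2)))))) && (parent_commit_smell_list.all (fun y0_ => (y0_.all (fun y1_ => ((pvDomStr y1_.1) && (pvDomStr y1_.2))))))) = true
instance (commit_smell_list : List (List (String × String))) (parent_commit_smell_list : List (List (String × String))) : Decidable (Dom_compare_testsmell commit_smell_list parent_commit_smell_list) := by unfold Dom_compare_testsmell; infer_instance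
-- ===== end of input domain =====

-- B accumulates the diff dict with +1/-1 inside the two counting passes, dropping A's key-set union and third scan (return value only; neither mutates its arguments).

-- ===== PORT A =====
-- smell['smellName'] (KeyError when absent — excluded by Pre_; under Pre_ the getD "" is never taken)
def pvName (smell : List (String × String)) : String :=
  ((PySem.Dict.ofList smell).get? "smellName").getD ""

def get_smell_count (smell_list : List (List (String × String))) : PySem.Dict String Int :=
  smell_list.foldl
    (fun d smell =>
      let smell_name := pvName smell
      if d.contains smell_name then d.insert smell_name (d.getD smell_name 0 + 1)
      else d.insert smell_name 1)
    PySem.Dict.empty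

def compare_testsmell (commit_smell_list : List (List (String × String))) (parent_commit_smell_list : List (List (String × String))) : List (String × List (String × Int)) :=
  -- the Python's if/else has two identical branches; transliterated as written
  let cs : PySem.Dict String Int :=
    if commit_smell_list.length ≠ parent_commit_smell_list.length then get_smell_count commit_smell_list
    else get_smell_count commit_smell_list
  let ps : PySem.Dict String Int :=
    if commit_smell_list.length ≠ parent_commit_smell_list.length then get_smell_count parent_commit_smell_list
    else get_smell_count parent_commit_smell_list
  let all_smells : PySem.Set String := PySem.Set.union (PySem.Set.ofList cs.keys) ps.keys
  let diff : PySem.Dict String Int :=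
    all_smells.foldl (fun d smell => d.insert smell (cs.getD smell 0 - ps.getD smell 0)) PySem.Dict.empty
  [("commit_smells", cs.items), ("parent_commit_smells", ps.items), ("diff_smells", diff.items)]

-- ===== PORT B =====
def compare_testsmell_alt (commit_smell_list : List (List (String × String))) (parent_commit_smell_list : List (List (String × String))) : List (String × List (String × Int)) :=
  let s1 : PySem.Dict String Int × PySem.Dict String Int :=
    commit_smell_list.foldl
      (fun st smell =>
        let name := pvName smell
        (st.1.modify name 0 (· + 1), st.2.modify name 0 (· + 1)))
      (PySem.Dict.empty, PySem.Dict.empty)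
  let s2 : PySem.Dict String Int × PySem.Dict String Int :=
    parent_commit_smell_list.foldl
      (fun st smell =>
        let name := pvName smell
        (st.1.modify name 0 (· + 1), st.2.modify name 0 (· - 1)))
      (PySem.Dict.empty, s1.2)
  [("commit_smells", s1.1.items), ("parent_commit_smells", s2.1.items), ("diff_smells", s2.2.items)]

-- ===== PRECONDITION & SPEC =====
-- Pre_ excludes exactly the inputs where some smell dict lacks the key 'smellName' (Python A raises KeyError there).
def Pre_compare_testsmell (commit_smell_list : List (List (String × String))) (parent_commit_smell_list : List (List (String × String))) : Prop :=
  (∀ smell ∈ commit_smell_list, (PySem.Dict.ofList smell).contains "smellName" = true) ∧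
  (∀ smell ∈ parent_commit_smell_list, (PySem.Dict.ofList smell).contains "smellName" = true)
instance (commit_smell_list : List (List (String × String))) (parent_commit_smell_list : List (List (String × String))) : Decidable (Pre_compare_testsmell commit_smell_list parent_commit_smell_list) := by unfold Pre_compare_testsmell; infer_instance
def pvWitness_compare_testsmell : (List (List (String × String))) × (List (List (String × String))) :=
  ([[("smellName", "Assertion Roulette")]], [[("smellName", "Eager Test")], [("smellName", "Assertion Roulette")]])
def Spec_compare_testsmell (commit_smell_list : List (List (String × String))) (parent_commit_smell_list : List (List (String × String))) (out : List (String × List (String × Int))) : Prop := out = compare_testsmell_alt commit_smell_list parent_commit_smell_list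
instance (commit_smell_list : List (List (String × String))) (parent_commit_smell_list : List (List (String × String))) (out : List (String × List (String × Int))) : Decidable (Spec_compare_testsmell commit_smell_list parent_commit_smell_list out) := by unfold Spec_compare_testsmell; infer_instance

-- ===== CLAIM (what is proved, stated in full; the proofs are below) =====
def Claim_equal_compare_testsmell : Prop := ∀ (commit_smell_list : List (List (String × String))) (parent_commit_smell_list : List (List (String × String))), Dom_compare_testsmell commit_smell_list parent_commit_smell_list → Pre_compare_testsmell commit_smell_list parent_commit_smell_list → Spec_compare_testsmell commit_smell_list parent_commit_smell_list (compare_testsmell commit_smell_list parent_commit_smell_list)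

-- ===== LEMMAS AND PROOFS =====

-- step of A's get_smell_count loop is exactly the d[k] = d.get(k,0)+1 update
theorem pv_step_eq (d : PySem.Dict String Int) (n : String) :
    (if d.contains n then d.insert n (d.getD n 0 + 1) else d.insert n 1)
      = d.insert n (d.getD n 0 + 1) := by
  by_cases h : d.contains n = true
  · simp [h]
  · simp only [Bool.not_eq_true] at h
    rw [PySem.Dict.getD_of_not_contains d 0 h]
    simp [h]

theorem get_smell_count_eq_counter (l : List (List (String × String))) :
    get_smell_count l = PySem.Dict.counter (l.map pvName) := by
  rw [← PySem.Dict.foldl_insert_getD_add_one_eq_counter, List.foldl_map]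
  unfold get_smell_count
  congr 1
  funext d sm
  exact pv_step_eq d (pvName sm)

-- a fold whose state is a pair of independently updated dicts splits componentwise
theorem pv_foldl_pair {α β γ : Type} (l : List α) (f : β → α → β) (g : γ → α → γ)
    (a : β) (b : γ) :
    l.foldl (fun st x => (f st.1 x, g st.2 x)) (a, b) = (l.foldl f a, l.foldl g b) := by
  induction l generalizing a b with
  | nil => rfl
  | cons x xs ih => simpa using ih (f a x) (g b x)

-- the −1 twin of PySem.Dict.getD_foldl_modify_add_one
theorem pv_getD_foldl_modify_sub_one (l : List String) (d : PySem.Dict String Int) (v : String) :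
    (l.foldl (fun d x => d.modify x 0 (· - 1)) d).getD v 0 = d.getD v 0 - l.count v := by
  induction l generalizing d with
  | nil => simp
  | cons x xs ih =>
    simp only [List.foldl_cons, ih, PySem.Dict.getD_modify, List.count_cons]
    by_cases h : v = x
    · simp [h]; ring
    · have h2 : ¬ x = v := fun hh => h hh.symm
      simp [h, h2]

-- diff dicts: A's union-and-insert fold and B's signed-counter fold have the same items
-- s.update(ofList xs) adds the same new elements as s.update(xs)
theorem pv_update_ofList (s : PySem.Set String) (xs : List String) :
    s.update (PySem.Set.ofList xs) = s.update xs := by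
  rw [PySem.Set.update_eq_append_filter, PySem.Set.update_eq_append_filter, PySem.Set.ofList_ofList]

-- diff dicts: A's union-and-insert fold and B's signed-counter fold have the same items
theorem pv_diff_items (cn pn : List String) :
    ((PySem.Set.union (PySem.Set.ofList (PySem.Dict.counter (κ := String) cn).keys) (PySem.Dict.counter (κ := String) pn).keys).foldl
        (fun d s => d.insert s ((PySem.Dict.counter cn).getD s 0 - (PySem.Dict.counter pn).getD s 0)) PySem.Dict.empty).items
      = (pn.foldl (fun d x => d.modify x 0 (· - 1)) (PySem.Dict.counter cn)).items := by
  have hU : PySem.Set.union (PySem.Set.ofList (PySem.Dict.counter (κ := String) cn).keys) (PySem.Dict.counter (κ := String) pn).keys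
      = PySem.Set.ofList (cn ++ pn) := by
    rw [PySem.Dict.keys_counter, PySem.Dict.keys_counter, PySem.Set.ofList_ofList,
        PySem.Set.ofList_append]
    exact (pv_update_ofList _ _)
  -- left side: a fold of inserts over fresh distinct keys
  have hL := PySem.Dict.items_foldl_insert_fresh (PySem.Set.ofList (cn ++ pn)) (fun s => s)
    (fun s => (PySem.Dict.counter cn).getD s 0 - (PySem.Dict.counter pn).getD s 0) PySem.Dict.empty
    (by intro a _; exact PySem.Dict.contains_empty a)
    (by rw [show (fun (s : String) => s) = id from rfl, List.map_id]; exact PySem.Set.nodup_ofList (cn ++ pn))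
  -- right side: keys and lookups of the signed-counter fold
  have hK : (pn.foldl (fun d x => d.modify x 0 (· - 1)) (PySem.Dict.counter (κ := String) cn)).keys
      = PySem.Set.ofList (cn ++ pn) := by
    rw [PySem.Dict.keys_foldl_modify pn 0 (fun _ _ => (· - 1)), PySem.Dict.keys_counter,
        PySem.Set.ofList_append]
  have hnd : (pn.foldl (fun d x => d.modify x 0 (· - 1)) (PySem.Dict.counter (κ := String) cn)).keys.Nodup := by
    rw [hK]; exact PySem.Set.nodup_ofList _
  have hR := PySem.Dict.items_eq_map_keys _ hnd 0
  rw [hU, hL, hR, hK]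
  simp only [show (PySem.Dict.empty : PySem.Dict String Int).items = [] from rfl, List.nil_append]
  refine List.map_congr_left (fun s _ => ?_)
  rw [pv_getD_foldl_modify_sub_one, PySem.Dict.getD_counter, PySem.Dict.getD_counter]

-- the pair folds of B split into independent dict folds
theorem pv_pair_add_add (l : List (List (String × String))) (a b : PySem.Dict String Int) :
    l.foldl (fun st smell => (st.1.modify (pvName smell) 0 (· + 1), st.2.modify (pvName smell) 0 (· + 1))) (a, b)
      = (l.foldl (fun d smell => d.modify (pvName smell) 0 (· + 1)) a,
         l.foldl (fun d smell => d.modify (pvName smell) 0 (· + 1)) b) :=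
  pv_foldl_pair l (fun d smell => d.modify (pvName smell) 0 (· + 1)) (fun d smell => d.modify (pvName smell) 0 (· + 1)) a b

theorem pv_pair_add_sub (l : List (List (String × String))) (a b : PySem.Dict String Int) :
    l.foldl (fun st smell => (st.1.modify (pvName smell) 0 (· + 1), st.2.modify (pvName smell) 0 (· - 1))) (a, b)
      = (l.foldl (fun d smell => d.modify (pvName smell) 0 (· + 1)) a,
         l.foldl (fun d smell => d.modify (pvName smell) 0 (· - 1)) b) :=
  pv_foldl_pair l (fun d smell => d.modify (pvName smell) 0 (· + 1)) (fun d smell => d.modify (pvName smell) 0 (· - 1)) a b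

-- pushing pvName out of the dict folds
theorem pv_name_fold_add (l : List (List (String × String))) (d : PySem.Dict String Int) :
    l.foldl (fun d smell => d.modify (pvName smell) 0 (· + 1)) d
      = (l.map pvName).foldl (fun d n => d.modify n 0 (· + 1)) d := by
  rw [List.foldl_map]

theorem pv_name_fold_sub (l : List (List (String × String))) (d : PySem.Dict String Int) :
    l.foldl (fun d smell => d.modify (pvName smell) 0 (· - 1)) d
      = (l.map pvName).foldl (fun d n => d.modify n 0 (· - 1)) d := by
  rw [List.foldl_map]

-- ===== VERDICT (by name: the statement is the Claim_ definition above) =====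
theorem compare_testsmell_spec : Claim_equal_compare_testsmell := by
  intro c p _ _
  unfold Spec_compare_testsmell compare_testsmell compare_testsmell_alt
  simp only [ite_self, get_smell_count_eq_counter, pv_pair_add_add, pv_pair_add_sub,
    pv_name_fold_add, pv_name_fold_sub]
  have hcnt : ∀ xs : List String, xs.foldl (fun d n => d.modify n 0 (· + 1)) PySem.Dict.empty
      = PySem.Dict.counter xs := fun _ => rfl
  simp only [hcnt]
  rw [pv_diff_items]
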